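-- pv_equiv track=rewrite | github.com/Sanjay-Suresh2005/erassh | erash/backend/wipe_service.py | _summarize_logs
-- ===== SOURCE A (Python) =====
-- def _summarize_logs(logs):
--     """Create a summary of important log entries"""
--     important_logs = []
--     for log in logs:
--         msg = log['message']
--         if any(keyword in msg.lower() for keyword in
--                ['starting', 'completed', 'pass', 'progress: 100%', 'error', 'failed']):
--             important_logs.append(msg)
--
--     return important_logs[-10:]  # Last 10 important entries
-- ===== SOURCE B (Python) =====
-- _KEYWORDS = ['starting', 'completed', 'pass', 'progress: 100%', 'error', 'failed']
--
-- def _summarize_logs(logs):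
--     """Scan from the newest entry, collect at most 10 important messages, restore order."""
--     buf = []
--     for log in reversed(logs):
--         msg = log['message']
--         if any(keyword in msg.lower() for keyword in _KEYWORDS):
--             buf.append(msg)
--             if len(buf) == 10:
--                 break
--     return buf[::-1]
-- ===== Notes on version B (the rewrite author's own statement) =====
-- stated objective: alternative
-- what changed: Instead of building the full filtered list and slicing its last 10, B scans the logs newest-first, stops as soon as 10 important messages are collected, and reverses the bounded buffer.
import Mathlib
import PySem

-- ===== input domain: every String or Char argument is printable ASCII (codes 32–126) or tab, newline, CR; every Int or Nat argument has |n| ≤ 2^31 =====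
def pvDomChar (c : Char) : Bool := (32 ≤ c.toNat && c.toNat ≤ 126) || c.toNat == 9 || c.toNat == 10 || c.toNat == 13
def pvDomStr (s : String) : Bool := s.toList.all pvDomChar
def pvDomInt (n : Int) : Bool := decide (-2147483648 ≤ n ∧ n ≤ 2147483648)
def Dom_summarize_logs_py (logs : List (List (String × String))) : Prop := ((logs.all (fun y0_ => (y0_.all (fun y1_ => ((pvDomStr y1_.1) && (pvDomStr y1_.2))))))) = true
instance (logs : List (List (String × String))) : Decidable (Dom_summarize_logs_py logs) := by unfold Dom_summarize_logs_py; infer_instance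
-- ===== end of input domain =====

-- B scans the logs newest-first, stops after collecting 10 important messages, and reverses
-- the bounded buffer, instead of A's full filtered list sliced with [-10:]. Same values.

-- shared helper: the identical keyword test both Pythons spell out
def pvImportant (msg : String) : Bool :=
  (["starting", "completed", "pass", "progress: 100%", "error", "failed"] : List String).any
    (fun keyword => PySem.Str.isIn keyword (PySem.Str.lower msg))

-- ===== PORT A =====
def summarize_logs_py (logs : List (List (String × String))) : List String :=
  let important_logs := logs.foldl (fun acc log =>
    let msg := (PySem.Dict.mk log).getD "message" ""
    if pvImportant msg then acc ++ [msg] else acc) []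
  PySem.List.slice important_logs (some (-10)) none

-- ===== PORT B =====
def pvCollect : List (List (String × String)) → List String → List String
  | [], buf => buf
  | log :: rest, buf =>
    let msg := (PySem.Dict.mk log).getD "message" ""
    if pvImportant msg then
      let buf' := buf ++ [msg]
      if buf'.length == 10 then buf' else pvCollect rest buf'
    else pvCollect rest buf

def summarize_logs_py_alt (logs : List (List (String × String))) : List String :=
  (pvCollect logs.reverse []).reverse

-- ===== PRECONDITION & SPEC =====
-- Pre_ excludes exactly the inputs where some log lacks the key 'message': there Python A raises KeyError.
def Pre_summarize_logs_py (logs : List (List (String × String))) : Prop :=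
  (logs.all (fun log => (PySem.Dict.mk log).contains "message")) = true
instance (logs : List (List (String × String))) : Decidable (Pre_summarize_logs_py logs) := by
  unfold Pre_summarize_logs_py; infer_instance

def pvWitness_summarize_logs_py : (List (List (String × String))) :=
  [[("message", "error: disk failed")], [("message", "ok")], [("message", "completed")]]

def Spec_summarize_logs_py (logs : List (List (String × String))) (out : List String) : Prop := out = summarize_logs_py_alt logs
instance (logs : List (List (String × String))) (out : List String) : Decidable (Spec_summarize_logs_py logs out) := by unfold Spec_summarize_logs_py; infer_instance

-- ===== CLAIM (what is proved, stated in full; the proofs are below) =====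
def Claim_equal_summarize_logs_py : Prop := ∀ (logs : List (List (String × String))), Dom_summarize_logs_py logs → Pre_summarize_logs_py logs → Spec_summarize_logs_py logs (summarize_logs_py logs)

-- ===== LEMMAS AND PROOFS =====

-- the filtered message list both ports compute around
def pvMsgs (logs : List (List (String × String))) : List String :=
  (logs.map (fun log => (PySem.Dict.mk log).getD "message" "")).filter pvImportant

lemma pvFoldl_eq (logs : List (List (String × String))) (acc : List String) :
    logs.foldl (fun acc log =>
      let msg := (PySem.Dict.mk log).getD "message" ""
      if pvImportant msg then acc ++ [msg] else acc) acc = acc ++ pvMsgs logs := by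
  induction logs generalizing acc with
  | nil => simp [pvMsgs]
  | cons l t ih =>
    simp only [List.foldl_cons, pvMsgs, List.map_cons, List.filter_cons]
    by_cases h : pvImportant ((PySem.Dict.mk l).getD "message" "") = true
    · simp [h, ih, pvMsgs]
    · simp [h, ih, pvMsgs]

lemma pvCollect_eq (logs : List (List (String × String))) (buf : List String)
    (hb : buf.length < 10) :
    pvCollect logs buf = buf ++ (pvMsgs logs).take (10 - buf.length) := by
  induction logs generalizing buf with
  | nil => simp [pvCollect, pvMsgs]
  | cons l t ih =>
    simp only [pvCollect, pvMsgs, List.map_cons, List.filter_cons]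
    by_cases h : pvImportant ((PySem.Dict.mk l).getD "message" "") = true
    · simp only [h, if_pos]
      by_cases h10 : buf.length + 1 = 10
      · have : (buf ++ [(PySem.Dict.mk l).getD "message" ""]).length == 10 := by
          simp [h10]
        simp only [this, if_pos]
        have : 10 - buf.length = 1 := by omega
        simp [this]
      · have hne : ((buf ++ [(PySem.Dict.mk l).getD "message" ""]).length == 10) = false := by
          simp; omega
        rw [hne]
        simp only [Bool.false_eq_true, if_false]
        rw [ih _ (by simp; omega)]
        have h1 : 10 - buf.length = (10 - (buf.length + 1)) + 1 := by omega
        simp [pvMsgs, h1, List.take_succ_cons]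
    · have h' : pvImportant ((PySem.Dict.mk l).getD "message" "") = false := by
        simpa using h
      simp [h', ih _ hb, pvMsgs]

lemma pvMsgs_reverse (logs : List (List (String × String))) :
    pvMsgs logs.reverse = (pvMsgs logs).reverse := by
  simp [pvMsgs, List.filter_reverse]

-- ===== VERDICT (by name: the statement is the Claim_ definition above) =====
theorem summarize_logs_py_spec : Claim_equal_summarize_logs_py := by
  intro logs _ _
  unfold Spec_summarize_logs_py summarize_logs_py summarize_logs_py_alt
  rw [pvFoldl_eq, pvCollect_eq _ _ (by simp), pvMsgs_reverse]
  simp only [List.nil_append]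
  rw [PySem.List.slice_from_neg_ofNat _ 10 (by omega), List.take_reverse, List.reverse_reverse]
  simp
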